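-- pv_equiv track=rewrite | github.com/kchen1025/Python-EPI | epi_judge_python/snake_string.py | snake_string
-- ===== SOURCE A (Python) =====
-- def snake_string(s: str) -> str:
--     out = ''
--
--     for i in range(1, len(s), 4):
--         out+=s[i]
--     for i in range(0,len(s),2):
--         out+=s[i]
--     for i in range(3, len(s), 4):
--         out+=s[i]
--     return out
-- ===== SOURCE B (Python) =====
-- def snake_string(s: str) -> str:
--     top, mid, bot = [], [], []
--     for i, c in enumerate(s):
--         if i % 4 == 1:
--             top.append(c)
--         elif i % 2 == 0:
--             mid.append(c)
--         else:
--             bot.append(c)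
--     return ''.join(top) + ''.join(mid) + ''.join(bot)
-- ===== Notes on version B (the rewrite author's own statement) =====
-- stated objective: alternative
-- what changed: Replaces A's three separate index-range scans over s by a single pass over enumerate(s) that distributes each character into one of three bucket lists, joined once at the end.
import Mathlib
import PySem

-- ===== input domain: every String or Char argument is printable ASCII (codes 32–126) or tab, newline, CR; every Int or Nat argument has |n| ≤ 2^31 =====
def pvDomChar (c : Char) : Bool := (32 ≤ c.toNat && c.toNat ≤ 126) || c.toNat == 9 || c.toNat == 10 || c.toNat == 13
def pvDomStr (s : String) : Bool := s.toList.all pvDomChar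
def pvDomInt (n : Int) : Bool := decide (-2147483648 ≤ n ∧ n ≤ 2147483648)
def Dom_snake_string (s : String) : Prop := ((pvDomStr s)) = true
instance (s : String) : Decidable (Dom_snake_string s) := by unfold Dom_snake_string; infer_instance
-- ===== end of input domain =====

-- B does one pass over enumerate(s) routing characters into three bucket lists joined once,
-- instead of A's three index-range scans with repeated string concatenation.

-- ===== PORT A =====
-- three 'for i in range(a, len(s), k): out += s[i]' loops, appending one char at a time
def snake_string (s : String) : String :=
  let cs := s.toList
  let n : Int := cs.length
  let out1 : List Char :=
    (PySem.List.pyRange 1 n 4).foldl (fun out i => out ++ [PySem.List.pyGetD cs i ' ']) []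
  let out2 : List Char :=
    (PySem.List.pyRange 0 n 2).foldl (fun out i => out ++ [PySem.List.pyGetD cs i ' ']) out1
  let out3 : List Char :=
    (PySem.List.pyRange 3 n 4).foldl (fun out i => out ++ [PySem.List.pyGetD cs i ' ']) out2
  String.ofList out3

-- ===== PORT B =====
-- single pass over enumerate(s): if i%4==1 → top, elif i%2==0 → mid, else → bot
def snake_string_alt (s : String) : String :=
  let acc :=
    (PySem.List.enumerate s.toList 0).foldl
      (fun (acc : List Char × List Char × List Char) (p : Int × Char) =>
        let (top, mid, bot) := acc
        if PySem.Int.mod p.1 4 = 1 then (top ++ [p.2], mid, bot)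
        else if PySem.Int.mod p.1 2 = 0 then (top, mid ++ [p.2], bot)
        else (top, mid, bot ++ [p.2]))
      ([], [], [])
  String.ofList (acc.1 ++ acc.2.1 ++ acc.2.2)

-- ===== PRECONDITION & SPEC =====
def Spec_snake_string (s : String) (out : String) : Prop := out = snake_string_alt s
instance (s : String) (out : String) : Decidable (Spec_snake_string s out) := by unfold Spec_snake_string; infer_instance

-- ===== CLAIM (what is proved, stated in full; the proofs are below) =====
def Claim_equal_snake_string : Prop := ∀ (s : String), Dom_snake_string s → Spec_snake_string s (snake_string s)

-- ===== LEMMAS AND PROOFS =====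

-- selector: the characters of cs whose (running) index satisfies p
def pvSel (p : Nat → Bool) : List Char → Nat → List Char
  | [], _ => []
  | c :: cs, i => (if p i then [c] else []) ++ pvSel p cs (i + 1)

theorem pvSel_append (p : Nat → Bool) (xs ys : List Char) :
    ∀ i, pvSel p (xs ++ ys) i = pvSel p xs i ++ pvSel p ys (i + xs.length) := by
  induction xs with
  | nil => intro i; simp [pvSel]
  | cons c cs ih =>
    intro i
    simp [pvSel, ih (i + 1)]
    ring_nf

-- B's fold over enumerate computes the three selectors
theorem pvB_foldl (cs : List Char) :
    ∀ (s0 : Nat) (t m b : List Char),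
      (PySem.List.enumerate cs (s0 : Int)).foldl
        (fun (acc : List Char × List Char × List Char) (p : Int × Char) =>
          if PySem.Int.mod p.1 4 = 1 then (acc.1 ++ [p.2], acc.2.1, acc.2.2)
          else if PySem.Int.mod p.1 2 = 0 then (acc.1, acc.2.1 ++ [p.2], acc.2.2)
          else (acc.1, acc.2.1, acc.2.2 ++ [p.2]))
        (t, m, b)
      = (t ++ pvSel (fun i => i % 4 == 1) cs s0,
         m ++ pvSel (fun i => i % 4 ≠ 1 && i % 2 == 0) cs s0,
         b ++ pvSel (fun i => i % 4 ≠ 1 && i % 2 ≠ 0) cs s0) := by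
  induction cs with
  | nil => intro s0 t m b; simp [PySem.List.enumerate_nil, pvSel]
  | cons c cs ih =>
    intro s0 t m b
    rw [PySem.List.enumerate_cons]
    have hcast : (s0 : Int) + 1 = ((s0 + 1 : Nat) : Int) := by push_cast; ring
    have h4 : PySem.Int.mod (s0 : Int) 4 = ((s0 % 4 : Nat) : Int) := by
      exact_mod_cast PySem.Int.mod_natCast s0 4
    have h2 : PySem.Int.mod (s0 : Int) 2 = ((s0 % 2 : Nat) : Int) := by
      exact_mod_cast PySem.Int.mod_natCast s0 2
    simp only [List.foldl_cons, hcast, ih]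
    have hi4 : (PySem.Int.mod ((s0 : Int)) 4 = 1) ↔ (s0 % 4 = 1) := by rw [h4]; omega
    have hi2 : (PySem.Int.mod ((s0 : Int)) 2 = 0) ↔ (s0 % 2 = 0) := by rw [h2]; omega
    by_cases hp4 : s0 % 4 = 1
    · rw [if_pos (hi4.mpr hp4)]
      simp [pvSel, hp4]
    · rw [if_neg (fun hc => hp4 (hi4.mp hc))]
      by_cases hp2 : s0 % 2 = 0
      · rw [if_pos (hi2.mpr hp2)]
        simp [pvSel, hp4, hp2]
      · rw [if_neg (fun hc => hp2 (hi2.mp hc))]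
        simp [pvSel, hp4, hp2, List.append_assoc]

-- pyGetD on a list extended on the right agrees below the old length
theorem pvGetD_append (cs : List Char) (c : Char) (i : Int) (h0 : 0 ≤ i)
    (h : i < (cs.length : Int)) :
    PySem.List.pyGetD (cs ++ [c]) i ' ' = PySem.List.pyGetD cs i ' ' := by
  have h1 : i.toNat < cs.length := by omega
  have h2 : i < ((cs ++ [c]).length : Int) := by simp; omega
  rw [PySem.List.pyGetD_eq_getElem _ _ h0 h2, PySem.List.pyGetD_eq_getElem _ _ h0 h]
  exact List.getElem_append_left h1

-- snoc step for pyRange with the three concrete (start, step) pairs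
theorem pvRange_snoc_1_4 (n : Nat) :
    PySem.List.pyRange 1 ((n : Int) + 1) 4
      = PySem.List.pyRange 1 (n : Int) 4 ++ (if n % 4 = 1 then [(n : Int)] else []) := by
  rw [PySem.List.pyRange_of_pos 1 ((n : Int) + 1) (by norm_num),
      PySem.List.pyRange_of_pos 1 (n : Int) (by norm_num)]
  by_cases h : n % 4 = 1
  · have hc : (if (1 : Int) < (n : Int) + 1 then (((n : Int) + 1 - 1 + 4 - 1) / 4).toNat else 0)
        = (if (1 : Int) < (n : Int) then (((n : Int) - 1 + 4 - 1) / 4).toNat else 0) + 1 := by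
      split_ifs <;> omega
    rw [hc, List.range_succ, List.map_append]
    simp only [h, if_pos]
    congr 1
    simp only [List.map_cons, List.map_nil]
    congr 1
    split_ifs with h1 <;> omega
  · have hc : (if (1 : Int) < (n : Int) + 1 then (((n : Int) + 1 - 1 + 4 - 1) / 4).toNat else 0)
        = (if (1 : Int) < (n : Int) then (((n : Int) - 1 + 4 - 1) / 4).toNat else 0) := by
      split_ifs <;> omega
    rw [hc]
    simp [h]

theorem pvRange_snoc_0_2 (n : Nat) :
    PySem.List.pyRange 0 ((n : Int) + 1) 2
      = PySem.List.pyRange 0 (n : Int) 2 ++ (if n % 2 = 0 then [(n : Int)] else []) := by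
  rw [PySem.List.pyRange_of_pos 0 ((n : Int) + 1) (by norm_num),
      PySem.List.pyRange_of_pos 0 (n : Int) (by norm_num)]
  by_cases h : n % 2 = 0
  · have hc : (if (0 : Int) < (n : Int) + 1 then (((n : Int) + 1 - 0 + 2 - 1) / 2).toNat else 0)
        = (if (0 : Int) < (n : Int) then (((n : Int) - 0 + 2 - 1) / 2).toNat else 0) + 1 := by
      split_ifs <;> omega
    rw [hc, List.range_succ, List.map_append]
    simp only [h, if_pos]
    congr 1
    simp only [List.map_cons, List.map_nil]
    congr 1
    split_ifs with h1 <;> omega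
  · have hc : (if (0 : Int) < (n : Int) + 1 then (((n : Int) + 1 - 0 + 2 - 1) / 2).toNat else 0)
        = (if (0 : Int) < (n : Int) then (((n : Int) - 0 + 2 - 1) / 2).toNat else 0) := by
      split_ifs <;> omega
    rw [hc]
    simp [h]

theorem pvRange_snoc_3_4 (n : Nat) :
    PySem.List.pyRange 3 ((n : Int) + 1) 4
      = PySem.List.pyRange 3 (n : Int) 4 ++ (if n % 4 = 3 then [(n : Int)] else []) := by
  rw [PySem.List.pyRange_of_pos 3 ((n : Int) + 1) (by norm_num),
      PySem.List.pyRange_of_pos 3 (n : Int) (by norm_num)]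
  by_cases h : n % 4 = 3
  · have hc : (if (3 : Int) < (n : Int) + 1 then (((n : Int) + 1 - 3 + 4 - 1) / 4).toNat else 0)
        = (if (3 : Int) < (n : Int) then (((n : Int) - 3 + 4 - 1) / 4).toNat else 0) + 1 := by
      split_ifs <;> omega
    rw [hc, List.range_succ, List.map_append]
    simp only [h, if_pos]
    congr 1
    simp only [List.map_cons, List.map_nil]
    congr 1
    split_ifs with h1 <;> omega
  · have hc : (if (3 : Int) < (n : Int) + 1 then (((n : Int) + 1 - 3 + 4 - 1) / 4).toNat else 0)
        = (if (3 : Int) < (n : Int) then (((n : Int) - 3 + 4 - 1) / 4).toNat else 0) := by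
      split_ifs <;> omega
    rw [hc]
    simp [h]

theorem pvBucket_1_4 (cs : List Char) :
    (PySem.List.pyRange 1 (cs.length : Int) 4).map (fun i => PySem.List.pyGetD cs i ' ')
      = pvSel (fun i => i % 4 == 1) cs 0 := by
  induction cs using List.reverseRecOn with
  | nil => simp [PySem.List.pyRange, pvSel]
  | append_singleton cs c ih =>
    have hlen : ((cs ++ [c]).length : Int) = (cs.length : Int) + 1 := by simp
    rw [hlen, pvRange_snoc_1_4 cs.length, List.map_append]
    have hmap : (PySem.List.pyRange 1 (cs.length : Int) 4).map
          (fun i => PySem.List.pyGetD (cs ++ [c]) i ' ')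
        = (PySem.List.pyRange 1 (cs.length : Int) 4).map (fun i => PySem.List.pyGetD cs i ' ') := by
      apply List.map_congr_left
      intro x hx
      rw [PySem.List.mem_pyRange_iff_of_pos (by norm_num)] at hx
      exact pvGetD_append cs c x (by omega) hx.2.1
    rw [hmap, ih, pvSel_append]
    congr 1
    have hget : PySem.List.pyGetD (cs ++ [c]) (cs.length : Int) ' ' = c := by
      rw [PySem.List.pyGetD_eq_getElem _ _ (by positivity) (by simp)]
      simp
    by_cases h : cs.length % 4 = 1
    · simp [h, pvSel, hget]
    · simp [h, pvSel]

theorem pvBucket_0_2 (cs : List Char) :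
    (PySem.List.pyRange 0 (cs.length : Int) 2).map (fun i => PySem.List.pyGetD cs i ' ')
      = pvSel (fun i => i % 4 ≠ 1 && i % 2 == 0) cs 0 := by
  induction cs using List.reverseRecOn with
  | nil => simp [PySem.List.pyRange, pvSel]
  | append_singleton cs c ih =>
    have hlen : ((cs ++ [c]).length : Int) = (cs.length : Int) + 1 := by simp
    rw [hlen, pvRange_snoc_0_2 cs.length, List.map_append]
    have hmap : (PySem.List.pyRange 0 (cs.length : Int) 2).map
          (fun i => PySem.List.pyGetD (cs ++ [c]) i ' ')
        = (PySem.List.pyRange 0 (cs.length : Int) 2).map (fun i => PySem.List.pyGetD cs i ' ') := by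
      apply List.map_congr_left
      intro x hx
      rw [PySem.List.mem_pyRange_iff_of_pos (by norm_num)] at hx
      exact pvGetD_append cs c x (by omega) hx.2.1
    rw [hmap, ih, pvSel_append]
    congr 1
    have hget : PySem.List.pyGetD (cs ++ [c]) (cs.length : Int) ' ' = c := by
      rw [PySem.List.pyGetD_eq_getElem _ _ (by positivity) (by simp)]
      simp
    by_cases h : cs.length % 2 = 0
    · have h4 : cs.length % 4 ≠ 1 := by omega
      simp [h, h4, pvSel, hget]
    · simp [h, pvSel]

theorem pvBucket_3_4 (cs : List Char) :
    (PySem.List.pyRange 3 (cs.length : Int) 4).map (fun i => PySem.List.pyGetD cs i ' ')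
      = pvSel (fun i => i % 4 ≠ 1 && i % 2 ≠ 0) cs 0 := by
  induction cs using List.reverseRecOn with
  | nil => simp [PySem.List.pyRange, pvSel]
  | append_singleton cs c ih =>
    have hlen : ((cs ++ [c]).length : Int) = (cs.length : Int) + 1 := by simp
    rw [hlen, pvRange_snoc_3_4 cs.length, List.map_append]
    have hmap : (PySem.List.pyRange 3 (cs.length : Int) 4).map
          (fun i => PySem.List.pyGetD (cs ++ [c]) i ' ')
        = (PySem.List.pyRange 3 (cs.length : Int) 4).map (fun i => PySem.List.pyGetD cs i ' ') := by
      apply List.map_congr_left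
      intro x hx
      rw [PySem.List.mem_pyRange_iff_of_pos (by norm_num)] at hx
      exact pvGetD_append cs c x (by omega) hx.2.1
    rw [hmap, ih, pvSel_append]
    congr 1
    have hget : PySem.List.pyGetD (cs ++ [c]) (cs.length : Int) ' ' = c := by
      rw [PySem.List.pyGetD_eq_getElem _ _ (by positivity) (by simp)]
      simp
    by_cases h : cs.length % 4 = 3
    · have h2 : cs.length % 2 ≠ 0 := by omega
      simp [h, h2, pvSel, hget]
    · have : ¬ (cs.length % 4 ≠ 1 ∧ cs.length % 2 ≠ 0) := by omega
      simp [h, pvSel]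
      omega

-- ===== VERDICT (by name: the statement is the Claim_ definition above) =====
theorem snake_string_spec : Claim_equal_snake_string := by
  intro s _
  unfold Spec_snake_string snake_string snake_string_alt
  simp only [PySem.List.foldl_append_singleton_eq_map]
  have hf := pvB_foldl s.toList 0 [] [] []
  simp only [Nat.cast_zero] at hf
  rw [hf]
  simp only [List.nil_append]
  rw [pvBucket_1_4, pvBucket_0_2, pvBucket_3_4]
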